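-- pv_equiv track=rewrite | github.com/licekto/challenges | advent-of-code/2023/python/advent_of_code/day_25.py | count
-- ===== SOURCE A (Python) =====
-- def dfs(graph, visited, init):
--     stack = [init]
--     cnt = 0
--
--     while len(stack) != 0:
--         n = stack.pop()
--         if n in visited:
--             continue
--         visited.add(n)
--         cnt += 1
--
--         for neigh in graph[n]:
--             stack.append(neigh)
--
--     return cnt
--
-- def count(graph):
--     visited = set()
--     c1 = dfs(graph, visited, list(graph.keys())[0])
--     c2_init = None
--     for n in graph:
--         if n not in visited:
--             c2_init = n
--     c2 = dfs(graph, visited, c2_init)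
--     return c1, c2
-- ===== SOURCE B (Python) =====
-- def dfs(graph, visited, node):
--     if node in visited:
--         return 0
--     visited.add(node)
--     total = 1
--     # recurse over the neighbours in reverse, visiting nodes in the same
--     # order as a LIFO stack traversal would
--     for neigh in reversed(graph[node]):
--         total += dfs(graph, visited, neigh)
--     return total
--
-- def count(graph):
--     visited = set()
--     c1 = dfs(graph, visited, list(graph.keys())[0])
--     c2_init = None
--     for n in graph:
--         if n not in visited:
--             c2_init = n
--     c2 = dfs(graph, visited, c2_init)
--     return c1, c2
-- ===== Notes on version B (the rewrite author's own statement) =====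
-- stated objective: alternative
-- what changed: The explicit-stack iterative DFS is replaced by a recursive DFS that recurses over each node's neighbours (in reverse, so it visits nodes in the same LIFO order); the two-component counting driver is unchanged.
-- outside the precondition, e.g. on count({}): A raises IndexError, B raises IndexError; on count({'a': ['b'], 'b': ['a']}): A raises KeyError, B raises KeyError
import Mathlib
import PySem

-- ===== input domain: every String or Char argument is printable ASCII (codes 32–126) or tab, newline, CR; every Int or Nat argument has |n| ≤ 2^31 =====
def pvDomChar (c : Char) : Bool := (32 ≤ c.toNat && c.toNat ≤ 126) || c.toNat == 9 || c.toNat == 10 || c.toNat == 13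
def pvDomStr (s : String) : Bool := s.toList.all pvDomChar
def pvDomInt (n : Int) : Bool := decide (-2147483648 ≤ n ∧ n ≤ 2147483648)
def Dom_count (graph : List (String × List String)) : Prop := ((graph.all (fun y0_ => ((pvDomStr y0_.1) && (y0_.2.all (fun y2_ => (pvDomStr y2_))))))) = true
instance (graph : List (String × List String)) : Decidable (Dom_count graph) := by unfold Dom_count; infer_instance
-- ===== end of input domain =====

-- B replaces the explicit-stack iterative DFS by a recursive DFS (same visit order: neighbours are
-- recursed over in reverse, matching the LIFO pops); the component-size driver is unchanged.
-- Objective: alternative decomposition, same asymptotic cost.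
-- Python A mutates its 'visited' set argument in place; both ports thread the set explicitly and
-- the equivalence proved here is about the return value.

-- ===== PORT A =====
def sumAdj (d : PySem.Dict String (List String)) (V : PySem.Set String) : Nat :=
  ((d.keys.filter (fun k => !(PySem.Set.contains V k))).map (fun k => (d.getD k []).length)).sum

theorem pv_contains_add (V : PySem.Set String) (n k : String) :
    PySem.Set.contains (PySem.Set.add V n) k = (PySem.Set.contains V k || k == n) := by
  rw [Bool.eq_iff_iff]
  simp only [Bool.or_eq_true, PySem.Set.contains_iff, beq_iff_eq]
  exact PySem.Set.mem_add (s := V) (x := n) (y := k)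

theorem pv_sum_filter_mono (l : List String) (f : String → Nat) (p q : String → Bool)
    (h : ∀ x, q x = true → p x = true) :
    ((l.filter q).map f).sum ≤ ((l.filter p).map f).sum := by
  induction l with
  | nil => simp
  | cons a t ih =>
    simp only [List.filter_cons]
    by_cases hq : q a = true
    · rw [if_pos hq, if_pos (h a hq)]
      simp only [List.map_cons, List.sum_cons]
      omega
    · rw [if_neg hq]
      by_cases hp : p a = true
      · rw [if_pos hp]
        simp only [List.map_cons, List.sum_cons]
        omega
      · rw [if_neg hp]
        exact ih

theorem pv_not_mem_of_contains_false (V : PySem.Set String) (x : String)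
    (h : PySem.Set.contains V x = false) : x ∉ V := by
  intro hm
  simp at h
  exact h hm

theorem pv_sum_filter_remove (l : List String) (f : String → Nat) (p : String → Bool) (n : String)
    (hn : n ∈ l) (hp : p n = true) :
    ((l.filter (fun k => p k && !(k == n))).map f).sum + f n ≤ ((l.filter p).map f).sum := by
  induction l with
  | nil => cases hn
  | cons a t ih =>
    simp only [List.filter_cons]
    by_cases ha : a = n
    · subst ha
      rw [if_neg (by simp), if_pos hp]
      simp only [List.map_cons, List.sum_cons]
      have := pv_sum_filter_mono t f p (fun k => p k && !(k == a))
        (fun x hx => by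
          have hx' : (p x && !(x == a)) = true := hx
          cases hpx : p x
          · rw [hpx] at hx'; simp at hx'
          · rfl)
      omega
    · have hn' : n ∈ t := by
        cases hn with
        | head => exact absurd rfl ha
        | tail _ h => exact h
      have ih' := ih hn'
      by_cases hpa : p a = true
      · have hb : (p a && !(a == n)) = true := by simp [hpa, ha]
        rw [if_pos hb, if_pos hpa]
        simp only [List.map_cons, List.sum_cons]
        omega
      · have hb : ¬ ((p a && !(a == n)) = true) := by simp [hpa]
        rw [if_neg hb, if_neg hpa]
        exact ih'

theorem pv_sumAdj_add_le (d : PySem.Dict String (List String)) (V : PySem.Set String) (n : String) :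
    sumAdj d (PySem.Set.add V n) ≤ sumAdj d V := by
  unfold sumAdj
  apply pv_sum_filter_mono
  intro x hx
  rw [pv_contains_add] at hx
  simp only [Bool.not_eq_eq_eq_not, Bool.not_true, Bool.or_eq_false_iff] at hx
  simp [pv_not_mem_of_contains_false V x hx.1]

theorem pv_sumAdj_add_key (d : PySem.Dict String (List String)) (V : PySem.Set String) (n : String)
    (hn : n ∈ d.keys) (hv : PySem.Set.contains V n = false) :
    sumAdj d (PySem.Set.add V n) + (d.getD n []).length ≤ sumAdj d V := by
  unfold sumAdj
  have hcong : d.keys.filter (fun k => !(PySem.Set.contains (PySem.Set.add V n) k))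
      = d.keys.filter (fun k => (!(PySem.Set.contains V k)) && !(k == n)) := by
    apply List.filter_congr
    intro x _
    rw [pv_contains_add]
    cases PySem.Set.contains V x <;> cases hxe : (x == n) <;> simp
  rw [hcong]
  exact pv_sum_filter_remove d.keys (fun k => (d.getD k []).length)
    (fun k => !(PySem.Set.contains V k)) n hn (by simp [pv_not_mem_of_contains_false V n hv])

theorem pv_getD_not_key (d : PySem.Dict String (List String)) (n : String)
    (hn : n ∉ d.keys) : d.getD n [] = [] := by
  have hc : d.contains n = false := by
    rw [PySem.Dict.contains_eq_decide_mem_keys]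
    simp [hn]
  rw [PySem.Dict.getD_of_not_contains]
  exact hc

-- the while-loop of Python's dfs: n = stack.pop() from the END, neighbours are appended
def dfsALoop (d : PySem.Dict String (List String)) (visited : PySem.Set String)
    (stack : List String) (cnt : Int) : Int × PySem.Set String :=
  match h : stack.getLast? with
  | none => (cnt, visited)
  | some n =>
    let rest := stack.dropLast
    if PySem.Set.contains visited n then
      dfsALoop d visited rest cnt                   -- continue
    else
      -- visited.add(n); cnt += 1; for neigh in graph[n]: stack.append(neigh)
      -- (graph[n] raises KeyError on a missing key — excluded by Pre_count; total form getD)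
      dfsALoop d (PySem.Set.add visited n) (rest ++ d.getD n []) (cnt + 1)
termination_by stack.length + sumAdj d visited
decreasing_by
  · have hne : stack ≠ [] := by
      intro he; rw [he] at h; simp at h
    have hpos : 0 < stack.length := List.length_pos_iff.mpr hne
    have hl : stack.dropLast.length = stack.length - 1 := by simp [List.length_dropLast]
    omega
  · have hne : stack ≠ [] := by
      intro he; rw [he] at h; simp at h
    have hpos : 0 < stack.length := List.length_pos_iff.mpr hne
    have hl : stack.dropLast.length = stack.length - 1 := by simp [List.length_dropLast]
    rename_i hnv
    have hv : PySem.Set.contains visited n = false := by simpa using hnv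
    by_cases hk : n ∈ d.keys
    · have h2 := pv_sumAdj_add_key d visited n hk hv
      simp only [List.length_append]
      omega
    · have h0 := pv_getD_not_key d n hk
      have h1 := pv_sumAdj_add_le d visited n
      simp only [h0, List.length_append, List.length_nil]
      omega

def count (graph : List (String × List String)) : Int × Int :=
  let d := PySem.Dict.ofList graph
  -- list(graph.keys())[0] raises IndexError on the empty graph — excluded by Pre_count
  let init1 := (PySem.List.pyGet? d.keys 0).getD ""
  let r1 := dfsALoop d PySem.Set.empty [init1] 0
  let c2_init : Option String :=
    d.keys.foldl (fun acc n => if PySem.Set.contains r1.2 n then acc else some n) none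
  -- dfs(graph, visited, None) raises KeyError when the graph is connected — excluded by Pre_count
  let r2 := dfsALoop d r1.2 [c2_init.getD ""] 0
  (r1.1, r2.1)

-- ===== PORT B =====
-- recursive dfs of Source B; 'fuel' is only a totality guard (count_alt passes enough for any input)
mutual
def dfsBNode (d : PySem.Dict String (List String)) (fuel : Nat)
    (visited : PySem.Set String) (node : String) : Int × PySem.Set String :=
  match fuel with
  | 0 => (0, visited)
  | fuel' + 1 =>
    if PySem.Set.contains visited node then (0, visited)
    else
      -- visited.add(node); total = 1; for neigh in reversed(graph[node]): total += dfs(…)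
      dfsBFold d fuel' (PySem.Set.add visited node) 1 (d.getD node []).reverse
termination_by (fuel, 0)

def dfsBFold (d : PySem.Dict String (List String)) (fuel : Nat)
    (visited : PySem.Set String) (total : Int) (l : List String) : Int × PySem.Set String :=
  match l with
  | [] => (total, visited)
  | x :: xs =>
    let r := dfsBNode d fuel visited x
    dfsBFold d fuel r.2 (total + r.1) xs
termination_by (fuel, l.length + 1)
end

def count_alt (graph : List (String × List String)) : Int × Int :=
  let d := PySem.Dict.ofList graph
  let fuel := 1 + sumAdj d PySem.Set.empty
  let init1 := (PySem.List.pyGet? d.keys 0).getD ""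
  let r1 := dfsBNode d fuel PySem.Set.empty init1
  let c2_init : Option String :=
    d.keys.foldl (fun acc n => if PySem.Set.contains r1.2 n then acc else some n) none
  let r2 := dfsBNode d fuel r1.2 (c2_init.getD "")
  (r1.1, r2.1)

-- ===== PRECONDITION & SPEC =====
-- reachability closure (breadth fixpoint), used only to state Pre_count; 'blocked' nodes are not expanded
def pvReachStep (d : PySem.Dict String (List String)) (blocked S : List String) : List String :=
  PySem.Set.update S ((S.filter (fun x => !(blocked.contains x))).flatMap (fun k => d.getD k []))

def pvReachIter (d : PySem.Dict String (List String)) (blocked : List String) :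
    Nat → List String → List String
  | 0, S => S
  | m + 1, S => pvReachIter d blocked m (pvReachStep d blocked S)

def pvClosure (d : PySem.Dict String (List String)) (blocked : List String) (init : String) :
    List String :=
  pvReachIter d blocked (d.size + sumAdj d PySem.Set.empty + 1) [init]

-- Pre_count holds exactly on the graphs Python A finishes on: the graph is nonempty (else
-- list(graph.keys())[0] raises IndexError), every node the first traversal reaches is a key, some
-- key is left unreached (else the second dfs starts from None and graph[None] raises KeyError),
-- and every new node the second traversal reaches is a key (else graph[...] raises KeyError).
def pvPreOk (d : PySem.Dict String (List String)) : Bool :=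
  match d.keys with
  | [] => false
  | k0 :: _ =>
    let R1 := pvClosure d [] k0
    R1.all (fun x => d.contains x) &&
      match (d.keys.filter (fun k => !(R1.contains k))).getLast? with
      | none => false
      | some k2 => (pvClosure d R1 k2).all (fun x => R1.contains x || d.contains x)

def Pre_count (graph : List (String × List String)) : Prop :=
  graph ≠ [] ∧ pvPreOk (PySem.Dict.ofList graph) = true
instance (graph : List (String × List String)) : Decidable (Pre_count graph) := by
  unfold Pre_count; infer_instance

def pvWitness_count : (List (String × List String)) := [("a", ["b"]), ("b", ["a"]), ("c", [])]

def Spec_count (graph : List (String × List String)) (out : Int × Int) : Prop := out = count_alt graph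
instance (graph : List (String × List String)) (out : Int × Int) : Decidable (Spec_count graph out) := by unfold Spec_count; infer_instance

-- ===== CLAIM (what is proved, stated in full; the proofs are below) =====
def Claim_equal_count : Prop := ∀ (graph : List (String × List String)), Dom_count graph → Pre_count graph → Spec_count graph (count graph)

-- ===== LEMMAS AND PROOFS =====

theorem pv_dfsA_nil (d : PySem.Dict String (List String)) (V : PySem.Set String) (c : Int) :
    dfsALoop d V [] c = (c, V) := by
  rw [dfsALoop]
  rfl

theorem pv_dfsA_last (d : PySem.Dict String (List String)) (V : PySem.Set String)
    (s : List String) (c : Int) (n : String) (h : s.getLast? = some n) :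
    dfsALoop d V s c =
      if PySem.Set.contains V n then dfsALoop d V s.dropLast c
      else dfsALoop d (PySem.Set.add V n) (s.dropLast ++ d.getD n []) (c + 1) := by
  rw [dfsALoop]
  split
  · rename_i h'; rw [h] at h'; cases h'
  · rename_i m h'; rw [h] at h'; cases h'; rfl

theorem pv_dfsA_shift (d : PySem.Dict String (List String)) :
    ∀ (N : Nat) (V : PySem.Set String) (s : List String) (c : Int),
      s.length + sumAdj d V ≤ N →
      dfsALoop d V s c = ((dfsALoop d V s 0).1 + c, (dfsALoop d V s 0).2) := by
  intro N
  induction N with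
  | zero =>
    intro V s c h
    have hs : s = [] := by
      cases s with
      | nil => rfl
      | cons a t => simp at h
    subst hs
    simp [pv_dfsA_nil]
  | succ N ih =>
    intro V s c h
    cases hsl : s.getLast? with
    | none =>
      have hs : s = [] := List.getLast?_eq_none_iff.mp hsl
      subst hs
      simp [pv_dfsA_nil]
    | some n =>
      have hne : s ≠ [] := by
        intro he; rw [he] at hsl; cases hsl
      have hpos : 0 < s.length := List.length_pos_iff.mpr hne
      have hdl : s.dropLast.length = s.length - 1 := by simp [List.length_dropLast]
      rw [pv_dfsA_last d V s c n hsl, pv_dfsA_last d V s 0 n hsl]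
      by_cases hv : PySem.Set.contains V n = true
      · rw [if_pos hv, if_pos hv]
        exact ih V s.dropLast c (by omega)
      · rw [if_neg hv, if_neg hv]
        have hv' : PySem.Set.contains V n = false := by simpa using hv
        have hm : (s.dropLast ++ d.getD n []).length + sumAdj d (PySem.Set.add V n) ≤ N := by
          by_cases hk : n ∈ d.keys
          · have h2 := pv_sumAdj_add_key d V n hk hv'
            simp only [List.length_append]
            omega
          · have h0 := pv_getD_not_key d n hk
            have h1 := pv_sumAdj_add_le d V n
            simp only [h0, List.length_append, List.length_nil]
            omega
        rw [ih _ _ (c + 1) hm, ih _ _ (0 + 1) hm]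
        simp [Prod.ext_iff]
        omega

theorem pv_sumAdj_dfsA_le (d : PySem.Dict String (List String)) :
    ∀ (N : Nat) (V : PySem.Set String) (s : List String) (c : Int),
      s.length + sumAdj d V ≤ N →
      sumAdj d (dfsALoop d V s c).2 ≤ sumAdj d V := by
  intro N
  induction N with
  | zero =>
    intro V s c h
    have hs : s = [] := by
      cases s with
      | nil => rfl
      | cons a t => simp at h
    subst hs
    simp [pv_dfsA_nil]
  | succ N ih =>
    intro V s c h
    cases hsl : s.getLast? with
    | none =>
      have hs : s = [] := List.getLast?_eq_none_iff.mp hsl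
      subst hs
      simp [pv_dfsA_nil]
    | some n =>
      have hne : s ≠ [] := by intro he; rw [he] at hsl; cases hsl
      have hpos : 0 < s.length := List.length_pos_iff.mpr hne
      have hdl : s.dropLast.length = s.length - 1 := by simp [List.length_dropLast]
      rw [pv_dfsA_last d V s c n hsl]
      by_cases hv : PySem.Set.contains V n = true
      · rw [if_pos hv]
        exact ih V s.dropLast c (by omega)
      · rw [if_neg hv]
        have hv' : PySem.Set.contains V n = false := by simpa using hv
        have hadd := pv_sumAdj_add_le d V n
        have hm : (s.dropLast ++ d.getD n []).length + sumAdj d (PySem.Set.add V n) ≤ N := by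
          by_cases hk : n ∈ d.keys
          · have h2 := pv_sumAdj_add_key d V n hk hv'
            simp only [List.length_append]
            omega
          · have h0 := pv_getD_not_key d n hk
            simp only [h0, List.length_append, List.length_nil]
            omega
        exact le_trans (ih _ _ (c + 1) hm) hadd

theorem pv_dfsA_append (d : PySem.Dict String (List String)) :
    ∀ (N : Nat) (V : PySem.Set String) (t s : List String) (c : Int),
      t.length + sumAdj d V ≤ N →
      dfsALoop d V (s ++ t) c
        = dfsALoop d (dfsALoop d V t c).2 s (dfsALoop d V t c).1 := by
  intro N
  induction N with
  | zero =>
    intro V t s c h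
    have ht : t = [] := by
      cases t with
      | nil => rfl
      | cons a t' => simp at h
    subst ht
    simp [pv_dfsA_nil]
  | succ N ih =>
    intro V t s c h
    cases hsl : t.getLast? with
    | none =>
      have ht : t = [] := List.getLast?_eq_none_iff.mp hsl
      subst ht
      simp [pv_dfsA_nil]
    | some n =>
      have hne : t ≠ [] := by intro he; rw [he] at hsl; cases hsl
      have hpos : 0 < t.length := List.length_pos_iff.mpr hne
      have hdl : t.dropLast.length = t.length - 1 := by simp [List.length_dropLast]
      have hsl' : (s ++ t).getLast? = some n := by
        rw [List.getLast?_append]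
        simp [hsl]
      have hdrop : (s ++ t).dropLast = s ++ t.dropLast := by
        rw [List.dropLast_append]
        simp [hne]
      rw [pv_dfsA_last d V (s ++ t) c n hsl', pv_dfsA_last d V t c n hsl]
      by_cases hv : PySem.Set.contains V n = true
      · rw [if_pos hv, if_pos hv, hdrop]
        exact ih V t.dropLast s c (by omega)
      · rw [if_neg hv, if_neg hv, hdrop]
        have hv' : PySem.Set.contains V n = false := by simpa using hv
        have hm : (t.dropLast ++ d.getD n []).length + sumAdj d (PySem.Set.add V n) ≤ N := by
          by_cases hk : n ∈ d.keys
          · have h2 := pv_sumAdj_add_key d V n hk hv'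
            simp only [List.length_append]
            omega
          · have h0 := pv_getD_not_key d n hk
            have h1 := pv_sumAdj_add_le d V n
            simp only [h0, List.length_append, List.length_nil]
            omega
        have := ih (PySem.Set.add V n) (t.dropLast ++ d.getD n []) s (c + 1) hm
        rw [← List.append_assoc] at this
        exact this

theorem pv_dfsBNode_succ (d : PySem.Dict String (List String)) (g : Nat)
    (V : PySem.Set String) (n : String) :
    dfsBNode d (g + 1) V n =
      if PySem.Set.contains V n then (0, V)
      else dfsBFold d g (PySem.Set.add V n) 1 (d.getD n []).reverse := by
  rw [dfsBNode]

theorem pv_dfsBFold_nil (d : PySem.Dict String (List String)) (f : Nat)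
    (V : PySem.Set String) (acc : Int) :
    dfsBFold d f V acc [] = (acc, V) := by
  rw [dfsBFold]

theorem pv_dfsBFold_cons (d : PySem.Dict String (List String)) (f : Nat)
    (V : PySem.Set String) (acc : Int) (x : String) (xs : List String) :
    dfsBFold d f V acc (x :: xs) =
      dfsBFold d f (dfsBNode d f V x).2 (acc + (dfsBNode d f V x).1) xs := by
  rw [dfsBFold]

theorem pv_L (d : PySem.Dict String (List String)) :
    ∀ f : Nat,
      (∀ (V : PySem.Set String) (n : String), 1 + sumAdj d V ≤ f →
        dfsBNode d f V n = dfsALoop d V [n] 0) ∧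
      (∀ (m : List String) (V : PySem.Set String) (acc : Int), m.length + sumAdj d V ≤ f →
        dfsBFold d f V acc m
          = ((dfsALoop d V m.reverse 0).1 + acc, (dfsALoop d V m.reverse 0).2)) := by
  intro f
  induction f with
  | zero =>
    constructor
    · intro V n h; omega
    · intro m V acc h
      have hm : m = [] := by
        cases m with
        | nil => rfl
        | cons a t => simp at h
      subst hm
      simp [pv_dfsBFold_nil, pv_dfsA_nil]
  | succ g IH =>
    have hone : ∀ (n : String), [n].getLast? = some n := by intro n; rfl
    have L1' : ∀ (V : PySem.Set String) (n : String), 1 + sumAdj d V ≤ g + 1 →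
        dfsBNode d (g + 1) V n = dfsALoop d V [n] 0 := by
      intro V n h
      rw [pv_dfsBNode_succ, pv_dfsA_last d V [n] 0 n (hone n)]
      by_cases hv : PySem.Set.contains V n = true
      · rw [if_pos hv, if_pos hv]
        simp [pv_dfsA_nil]
      · rw [if_neg hv, if_neg hv]
        have hv' : PySem.Set.contains V n = false := by simpa using hv
        have hb : (d.getD n []).reverse.length + sumAdj d (PySem.Set.add V n) ≤ g := by
          by_cases hk : n ∈ d.keys
          · have h2 := pv_sumAdj_add_key d V n hk hv'
            simp only [List.length_reverse]
            omega
          · have h0 := pv_getD_not_key d n hk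
            have h1 := pv_sumAdj_add_le d V n
            simp only [h0, List.reverse_nil, List.length_nil]
            omega
        rw [IH.2 (d.getD n []).reverse (PySem.Set.add V n) 1 hb]
        rw [List.reverse_reverse]
        have hsh := pv_dfsA_shift d ((d.getD n []).length + sumAdj d (PySem.Set.add V n))
          (PySem.Set.add V n) (d.getD n []) (0 + 1) (le_refl _)
        have hds : ([n] : List String).dropLast = [] := rfl
        rw [hds, List.nil_append, hsh]
        simp
    refine ⟨L1', ?_⟩
    intro m
    induction m with
    | nil =>
      intro V acc h
      simp [pv_dfsBFold_nil, pv_dfsA_nil]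
    | cons x xs ihm =>
      intro V acc h
      rw [pv_dfsBFold_cons]
      have h1 : 1 + sumAdj d V ≤ g + 1 := by
        simp only [List.length_cons] at h
        omega
      rw [L1' V x h1]
      set r := dfsALoop d V [x] 0 with hr
      have hrle : sumAdj d r.2 ≤ sumAdj d V := by
        rw [hr]
        exact pv_sumAdj_dfsA_le d (1 + sumAdj d V) V [x] 0 (by simp)
      have hxs : xs.length + sumAdj d r.2 ≤ g + 1 := by
        simp only [List.length_cons] at h
        omega
      rw [ihm r.2 (acc + r.1) hxs]
      rw [List.reverse_cons]
      have happ := pv_dfsA_append d (1 + sumAdj d V) V [x] xs.reverse 0 (by simp)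
      rw [happ, ← hr]
      have hsh := pv_dfsA_shift d (xs.reverse.length + sumAdj d r.2) r.2 xs.reverse r.1 (le_refl _)
      rw [hsh]
      simp [Prod.ext_iff]
      omega

theorem pv_count_eq (graph : List (String × List String)) : count graph = count_alt graph := by
  unfold count count_alt
  dsimp only
  set d := PySem.Dict.ofList graph with hd
  set init1 := (PySem.List.pyGet? d.keys 0).getD "" with hi
  have h1 : dfsBNode d (1 + sumAdj d PySem.Set.empty) PySem.Set.empty init1
      = dfsALoop d PySem.Set.empty [init1] 0 := (pv_L d _).1 _ _ (le_refl _)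
  rw [h1]
  set r1 := dfsALoop d PySem.Set.empty [init1] 0 with hr1
  have hle : sumAdj d r1.2 ≤ sumAdj d PySem.Set.empty := by
    rw [hr1]
    exact pv_sumAdj_dfsA_le d (1 + sumAdj d PySem.Set.empty) PySem.Set.empty [init1] 0 (by simp)
  set c2i := (d.keys.foldl (fun acc n => if PySem.Set.contains r1.2 n then acc else some n) none).getD "" with hc2
  have h2 : dfsBNode d (1 + sumAdj d PySem.Set.empty) r1.2 c2i
      = dfsALoop d r1.2 [c2i] 0 := (pv_L d _).1 _ _ (by omega)
  rw [h2]

-- ===== VERDICT (by name: the statement is the Claim_ definition above) =====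
theorem count_spec : Claim_equal_count := by
  intro graph _ _
  exact pv_count_eq graph
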